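-- pv_equiv track=rewrite | github.com/Qwerty999123/Detailed_Project_Report_Analysis | main.py | generate_requirements_document
-- ===== SOURCE A (Python) =====
-- from typing import List, Dict
--
-- def generate_requirements_document(requirements: List[Dict],
--                                  document_structure: Dict,
--                                  output_format: str) -> str:
--     """Generate final requirements document"""
--
--     # Group requirements by type
--     grouped_reqs = {
--         'functional': [],
--         'non-functional': [],
--         'technical': [],
--         'business': [],
--         'other': []
--     }
--
--     for req in requirements:
--         req_type = req.get('type', 'other')
--         if req_type in grouped_reqs:
--             grouped_reqs[req_type].append(req)
--         else:
--             grouped_reqs['other'].append(req)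
--
--     # Generate document content
--     doc_content = []
--
--     # Header
--     # project_name = document_structure.get('document_metadata', {}).get('project_name', 'Unknown Project')
--     # doc_content.append(f"# Requirements Document: {project_name}")
--     # doc_content.append("")
--
--     # # Document metadata
--     # doc_content.append("## Document Information")
--     # doc_content.append("")
--     # metadata = document_structure.get('document_metadata', {})
--     # for key, value in metadata.items():
--     #     doc_content.append(f"- **{key.replace('_', ' ').title()}**: {value}")
--     # doc_content.append("")
--
--     # # Processing statistics
--     # doc_content.append("## Processing Summary")
--     # doc_content.append("")
--     # doc_content.append(f"- **Total Requirements Extracted**: {len(requirements)}")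
--     # doc_content.append(f"- **Document Chunks Processed**: {self.processing_stats.get('total_chunks', 0)}")
--     # doc_content.append(f"- **Quality Score**: {self.processing_stats.get('quality_score', 0):.1f}/10")
--     # doc_content.append("")
--     desc = []
--     # Requirements by type
--     for req_type, reqs in grouped_reqs.items():
--         if reqs:
--             doc_content.append(f"## {req_type.replace('_', '-').title()} Requirements")
--             doc_content.append("")
--
--             for req in reqs:
--
--                 if req.get('description', 'No description') not in desc:
--
--                     desc.append(req.get('description', 'No description'))
--
--                     doc_content.append(f"### {req.get('id', 'REQ-UNKNOWN')}")
--                     doc_content.append("")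
--                     doc_content.append(f"**Description**: {req.get('description', 'No description')}")
--                     doc_content.append("")
--         #             doc_content.append(f"**Priority**: {req.get('priority', 'unknown').title()}")
--         #             doc_content.append("")
--
--         #             if req.get('technical_specifications'):
--         #                 doc_content.append("**Technical Specifications**:")
--         #                 for spec in req['technical_specifications']:
--         #                     doc_content.append(f"- {spec}")
--         #                 doc_content.append("")
--
--         #             if req.get('performance_criteria'):
--         #                 doc_content.append("**Performance Criteria**:")
--         #                 for criteria in req['performance_criteria']:
--         #                     doc_content.append(f"- {criteria}")
--         #                 doc_content.append("")
--
--         #             if req.get('acceptance_criteria'):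
--         #                 doc_content.append("**Acceptance Criteria**:")
--         #                 for criteria in req['acceptance_criteria']:
--         #                     doc_content.append(f"- {criteria}")
--         #                 doc_content.append("")
--
--         #             source_chunk = req.get('source_chunk', {})
--         #             if source_chunk:
--         #                 doc_content.append(f"**Source**: {source_chunk.get('section', 'Unknown')} (Page {source_chunk.get('page', 'Unknown')})")
--         #                 doc_content.append("")
--
--         #             doc_content.append("---")
--         #             doc_content.append("")
--
--     return '\n'.join(doc_content)
-- ===== SOURCE B (Python) =====
-- def generate_requirements_document(requirements, document_structure, output_format):
--     """Generate final requirements document (sort-then-group instead of bucket dict)"""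
--     order = ['functional', 'non-functional', 'technical', 'business', 'other']
--
--     def rank(req):
--         t = req.get('type', 'other')
--         return order.index(t) if t in order else 4
--
--     doc_content = []
--     seen = set()
--     prev = None
--     for req in sorted(requirements, key=rank):
--         r = rank(req)
--         if r != prev:
--             doc_content.append(f"## {order[r].replace('_', '-').title()} Requirements")
--             doc_content.append("")
--             prev = r
--         d = req.get('description', 'No description')
--         if d not in seen:
--             seen.add(d)
--             doc_content.append(f"### {req.get('id', 'REQ-UNKNOWN')}")
--             doc_content.append("")
--             doc_content.append(f"**Description**: {d}")
--             doc_content.append("")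
--     return '\n'.join(doc_content)
-- ===== Notes on version B (the rewrite author's own statement) =====
-- stated objective: alternative
-- what changed: Replaces A's five-bucket grouping dict (build all buckets, then a second loop over the fixed key order) by a stable sort on a category-rank key followed by a single group-aware pass that emits a section header whenever the category changes and dedups descriptions across the whole pass.
import Mathlib
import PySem

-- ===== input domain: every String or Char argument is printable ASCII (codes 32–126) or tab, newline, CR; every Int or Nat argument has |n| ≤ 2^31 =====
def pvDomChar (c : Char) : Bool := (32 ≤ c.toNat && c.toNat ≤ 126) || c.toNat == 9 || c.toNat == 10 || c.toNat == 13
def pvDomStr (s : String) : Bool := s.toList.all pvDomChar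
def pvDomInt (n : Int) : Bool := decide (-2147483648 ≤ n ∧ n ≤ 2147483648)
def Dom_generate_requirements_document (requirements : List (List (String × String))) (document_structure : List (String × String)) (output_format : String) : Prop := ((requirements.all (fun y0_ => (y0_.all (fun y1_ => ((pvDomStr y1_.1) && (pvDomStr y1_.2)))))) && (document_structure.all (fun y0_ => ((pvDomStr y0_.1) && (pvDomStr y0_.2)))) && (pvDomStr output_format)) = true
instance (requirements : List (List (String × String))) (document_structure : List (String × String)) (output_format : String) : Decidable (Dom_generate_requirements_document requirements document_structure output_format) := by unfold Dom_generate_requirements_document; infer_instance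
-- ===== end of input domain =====

-- B replaces A's five-bucket grouping dict by a stable sort on a category rank followed by one
-- group-aware pass (alternative decomposition, same asymptotic cost up to the sort).

-- ===== PORT A =====
-- A's grouped_reqs dict has five FIXED keys in literal order functional, non-functional, technical,
-- business, other; it is transliterated as a 5-tuple of bucket lists in that key order, and the
-- 'req_type in grouped_reqs' membership test as the explicit comparison chain (t = "other" and an
-- unknown type both land in the last bucket, exactly as in A).
def pvGroup (requirements : List (List (String × String))) :
    List (List (String × String)) × List (List (String × String)) × List (List (String × String)) ×
      List (List (String × String)) × List (List (String × String)) :=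
  requirements.foldl (fun g req =>
    let t := PySem.Dict.getD (PySem.Dict.mk req) "type" "other"
    if t = "functional" then (g.1 ++ [req], g.2.1, g.2.2.1, g.2.2.2.1, g.2.2.2.2)
    else if t = "non-functional" then (g.1, g.2.1 ++ [req], g.2.2.1, g.2.2.2.1, g.2.2.2.2)
    else if t = "technical" then (g.1, g.2.1, g.2.2.1 ++ [req], g.2.2.2.1, g.2.2.2.2)
    else if t = "business" then (g.1, g.2.1, g.2.2.1, g.2.2.2.1 ++ [req], g.2.2.2.2)
    else (g.1, g.2.1, g.2.2.1, g.2.2.2.1, g.2.2.2.2 ++ [req]))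
    ([], [], [], [], [])

-- one iteration of A's outer loop over grouped_reqs.items(); state = (doc_content, desc);
-- the header string f"## {req_type.replace('_','-').title()} Requirements" is a constant per key
-- (the five keys are literals) and is passed in evaluated.
def pvEmitBucket (header : String) (reqs : List (List (String × String)))
    (st : List String × List String) : List String × List String :=
  if reqs.isEmpty then st
  else reqs.foldl (fun st req =>
    let d := PySem.Dict.getD (PySem.Dict.mk req) "description" "No description"
    if st.2.contains d then st
    else (st.1 ++ ["### " ++ PySem.Dict.getD (PySem.Dict.mk req) "id" "REQ-UNKNOWN", "", "**Description**: " ++ d, ""],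
          st.2 ++ [d]))
    (st.1 ++ [header, ""], st.2)

def generate_requirements_document (requirements : List (List (String × String))) (document_structure : List (String × String)) (output_format : String) : String :=
  let g := pvGroup requirements
  let st : List String × List String := ([], [])
  let st := pvEmitBucket "## Functional Requirements" g.1 st
  let st := pvEmitBucket "## Non-Functional Requirements" g.2.1 st
  let st := pvEmitBucket "## Technical Requirements" g.2.2.1 st
  let st := pvEmitBucket "## Business Requirements" g.2.2.2.1 st
  let st := pvEmitBucket "## Other Requirements" g.2.2.2.2 st
  PySem.Str.join "\n" st.1

-- ===== PORT B =====
def pvOrder : List String := ["functional", "non-functional", "technical", "business", "other"]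

-- Source B's rank: order.index(t) if t in order else 4
def pvRank (req : List (String × String)) : Int :=
  let t := PySem.Dict.getD (PySem.Dict.mk req) "type" "other"
  if t ∈ pvOrder then (((PySem.List.index? pvOrder t).getD 0 : Nat) : Int) else 4

-- Source B's f"## {order[r].replace('_','-').title()} Requirements": the five names are constants,
-- the table holds the evaluated results.
def pvHeaderOf (r : Int) : String :=
  if r = 0 then "## Functional Requirements"
  else if r = 1 then "## Non-Functional Requirements"
  else if r = 2 then "## Technical Requirements"
  else if r = 3 then "## Business Requirements"
  else "## Other Requirements"

-- one iteration of Source B's loop; state = (doc_content, seen, prev)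
def pvStep (st : List String × PySem.Set String × Option Int) (req : List (String × String)) :
    List String × PySem.Set String × Option Int :=
  let r := pvRank req
  let doc := if some r ≠ st.2.2 then st.1 ++ [pvHeaderOf r, ""] else st.1
  let prev := if some r ≠ st.2.2 then some r else st.2.2
  let d := PySem.Dict.getD (PySem.Dict.mk req) "description" "No description"
  if PySem.Set.contains st.2.1 d then (doc, st.2.1, prev)
  else (doc ++ ["### " ++ PySem.Dict.getD (PySem.Dict.mk req) "id" "REQ-UNKNOWN", "", "**Description**: " ++ d, ""],
        PySem.Set.add st.2.1 d, prev)

def generate_requirements_document_alt (requirements : List (List (String × String))) (document_structure : List (String × String)) (output_format : String) : String :=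
  let res := (PySem.List.sorted requirements pvRank false).foldl pvStep ([], PySem.Set.empty, none)
  PySem.Str.join "\n" res.1

-- ===== PRECONDITION & SPEC =====
def Spec_generate_requirements_document (requirements : List (List (String × String))) (document_structure : List (String × String)) (output_format : String) (out : String) : Prop := out = generate_requirements_document_alt requirements document_structure output_format
instance (requirements : List (List (String × String))) (document_structure : List (String × String)) (output_format : String) (out : String) : Decidable (Spec_generate_requirements_document requirements document_structure output_format out) := by unfold Spec_generate_requirements_document; infer_instance

-- ===== CLAIM (what is proved, stated in full; the proofs are below) =====
def Claim_equal_generate_requirements_document : Prop := ∀ (requirements : List (List (String × String))) (document_structure : List (String × String)) (output_format : String), Dom_generate_requirements_document requirements document_structure output_format → Spec_generate_requirements_document requirements document_structure output_format (generate_requirements_document requirements document_structure output_format)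





-- ===== LEMMAS AND PROOFS =====

-- the bucket of category i, in input order
def pvF (i : Int) (xs : List (List (String × String))) : List (List (String × String)) :=
  xs.filter (fun r => decide (pvRank r = i))

-- the body of A's inner loop (and of B's loop once the header part is settled)
def pvItem (st : List String × List String) (req : List (String × String)) :
    List String × List String :=
  let d := PySem.Dict.getD (PySem.Dict.mk req) "description" "No description"
  if st.2.contains d then st
  else (st.1 ++ ["### " ++ PySem.Dict.getD (PySem.Dict.mk req) "id" "REQ-UNKNOWN", "", "**Description**: " ++ d, ""],
        st.2 ++ [d])

theorem pvEmitBucket_eq (header : String) (reqs : List (List (String × String)))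
    (st : List String × List String) :
    pvEmitBucket header reqs st
      = if reqs.isEmpty then st else reqs.foldl pvItem (st.1 ++ [header, ""], st.2) := rfl

-- the effective category of a requirement, as the if-chain A branches on
theorem pvRank_cases (req : List (String × String)) :
    pvRank req = (if PySem.Dict.getD (PySem.Dict.mk req) "type" "other" = "functional" then 0
      else if PySem.Dict.getD (PySem.Dict.mk req) "type" "other" = "non-functional" then 1
      else if PySem.Dict.getD (PySem.Dict.mk req) "type" "other" = "technical" then 2
      else if PySem.Dict.getD (PySem.Dict.mk req) "type" "other" = "business" then 3
      else (4 : Int)) := by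
  unfold pvRank
  set t := PySem.Dict.getD (PySem.Dict.mk req) "type" "other" with ht
  by_cases h0 : t = "functional"
  · simp [h0, pvOrder, PySem.List.index?]
  by_cases h1 : t = "non-functional"
  · simp [h1, pvOrder, PySem.List.index?]; decide
  by_cases h2 : t = "technical"
  · simp [h2, pvOrder, PySem.List.index?]; decide
  by_cases h3 : t = "business"
  · simp [h3, pvOrder, PySem.List.index?]; decide
  by_cases h4 : t = "other"
  · simp [h4, pvOrder, PySem.List.index?]; decide
  · simp [pvOrder, h0, h1, h2, h3, h4]

theorem pvRank_mem (req : List (String × String)) :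
    pvRank req = 0 ∨ pvRank req = 1 ∨ pvRank req = 2 ∨ pvRank req = 3 ∨ pvRank req = 4 := by
  rw [pvRank_cases]
  split_ifs <;> simp_all

theorem pvF_cons (i : Int) (x : List (String × String)) (xs : List (List (String × String))) :
    pvF i (x :: xs) = if pvRank x = i then x :: pvF i xs else pvF i xs := by
  simp only [pvF, List.filter_cons]
  split_ifs with h h' h' <;> simp_all

-- stable insertion passes over a prefix it does not insert in front of
theorem insertBy_prefix {α : Type} (before : α → α → Bool) (x : α) (as bs : List α)
    (h : ∀ a ∈ as, before x a = false) :
    PySem.List.insertBy before x (as ++ bs) = as ++ PySem.List.insertBy before x bs := by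
  induction as with
  | nil => simp
  | cons a as ih =>
    have ha : before x a = false := h a (by simp)
    simp only [List.cons_append, PySem.List.insertBy, ha]
    simp only [Bool.false_eq_true, if_false, List.cons.injEq, true_and]
    exact ih (fun a ha' => h a (by simp [ha']))

-- … and stops in front of a block it precedes entirely
theorem insertBy_all_before {α : Type} (before : α → α → Bool) (x : α) (bs : List α)
    (h : ∀ b ∈ bs, before x b = true) :
    PySem.List.insertBy before x bs = x :: bs := by
  cases bs with
  | nil => rfl
  | cons b bs => simp [PySem.List.insertBy, h b (by simp)]

-- inserting by rank into five rank-homogeneous blocks appends at the end of the x-ranked block;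
-- folded over the whole input: the stable sort is the five buckets laid end to end
theorem foldl_ins (xs : List (List (String × String))) :
    ∀ A0 A1 A2 A3 A4 : List (List (String × String)),
      (∀ r ∈ A0, pvRank r = 0) → (∀ r ∈ A1, pvRank r = 1) → (∀ r ∈ A2, pvRank r = 2) →
      (∀ r ∈ A3, pvRank r = 3) → (∀ r ∈ A4, pvRank r = 4) →
      xs.foldl (fun acc x => PySem.List.insertBy (fun a b => decide (pvRank a < pvRank b)) x acc)
          (A0 ++ A1 ++ A2 ++ A3 ++ A4)
        = (A0 ++ pvF 0 xs) ++ (A1 ++ pvF 1 xs) ++ (A2 ++ pvF 2 xs) ++ (A3 ++ pvF 3 xs)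
            ++ (A4 ++ pvF 4 xs) := by
  induction xs with
  | nil => intro A0 A1 A2 A3 A4 _ _ _ _ _; simp [pvF]
  | cons x xs ih =>
    intro A0 A1 A2 A3 A4 h0 h1 h2 h3 h4
    rw [List.foldl_cons]
    rcases pvRank_mem x with hr | hr | hr | hr | hr
    · rw [show A0 ++ A1 ++ A2 ++ A3 ++ A4 = A0 ++ (A1 ++ A2 ++ A3 ++ A4) by simp]
      rw [insertBy_prefix _ x A0 _ (by intro a ha; simp [hr, h0 a ha])]
      rw [insertBy_all_before _ x _ (by
        intro b hb; simp only [List.mem_append] at hb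
        rcases hb with ((h | h) | h) | h
        · simp [hr, h1 b h]
        · simp [hr, h2 b h]
        · simp [hr, h3 b h]
        · simp [hr, h4 b h])]
      rw [show A0 ++ (x :: (A1 ++ A2 ++ A3 ++ A4)) = (A0 ++ [x]) ++ A1 ++ A2 ++ A3 ++ A4 by simp]
      rw [ih (A0 ++ [x]) A1 A2 A3 A4
        (by intro r hrm; rcases List.mem_append.mp hrm with h | h
            · exact h0 r h
            · simp at h; rw [h]; exact hr) h1 h2 h3 h4]
      simp [pvF_cons, hr]
    · rw [show A0 ++ A1 ++ A2 ++ A3 ++ A4 = (A0 ++ A1) ++ (A2 ++ A3 ++ A4) by simp]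
      rw [insertBy_prefix _ x (A0 ++ A1) _ (by
        intro a ha; rcases List.mem_append.mp ha with h | h
        · simp [hr, h0 a h]
        · simp [hr, h1 a h])]
      rw [insertBy_all_before _ x _ (by
        intro b hb; simp only [List.mem_append] at hb
        rcases hb with (h | h) | h
        · simp [hr, h2 b h]
        · simp [hr, h3 b h]
        · simp [hr, h4 b h])]
      rw [show (A0 ++ A1) ++ (x :: (A2 ++ A3 ++ A4)) = A0 ++ (A1 ++ [x]) ++ A2 ++ A3 ++ A4 by simp]
      rw [ih A0 (A1 ++ [x]) A2 A3 A4 h0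
        (by intro r hrm; rcases List.mem_append.mp hrm with h | h
            · exact h1 r h
            · simp at h; rw [h]; exact hr) h2 h3 h4]
      simp [pvF_cons, hr]
    · rw [show A0 ++ A1 ++ A2 ++ A3 ++ A4 = (A0 ++ A1 ++ A2) ++ (A3 ++ A4) by simp]
      rw [insertBy_prefix _ x (A0 ++ A1 ++ A2) _ (by
        intro a ha; simp only [List.mem_append] at ha
        rcases ha with (h | h) | h
        · simp [hr, h0 a h]
        · simp [hr, h1 a h]
        · simp [hr, h2 a h])]
      rw [insertBy_all_before _ x _ (by
        intro b hb; rcases List.mem_append.mp hb with h | h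
        · simp [hr, h3 b h]
        · simp [hr, h4 b h])]
      rw [show (A0 ++ A1 ++ A2) ++ (x :: (A3 ++ A4)) = A0 ++ A1 ++ (A2 ++ [x]) ++ A3 ++ A4 by simp]
      rw [ih A0 A1 (A2 ++ [x]) A3 A4 h0 h1
        (by intro r hrm; rcases List.mem_append.mp hrm with h | h
            · exact h2 r h
            · simp at h; rw [h]; exact hr) h3 h4]
      simp [pvF_cons, hr]
    · rw [show A0 ++ A1 ++ A2 ++ A3 ++ A4 = (A0 ++ A1 ++ A2 ++ A3) ++ A4 by simp]
      rw [insertBy_prefix _ x (A0 ++ A1 ++ A2 ++ A3) _ (by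
        intro a ha; simp only [List.mem_append] at ha
        rcases ha with ((h | h) | h) | h
        · simp [hr, h0 a h]
        · simp [hr, h1 a h]
        · simp [hr, h2 a h]
        · simp [hr, h3 a h])]
      rw [insertBy_all_before _ x _ (by intro b hb; simp [hr, h4 b hb])]
      rw [show (A0 ++ A1 ++ A2 ++ A3) ++ (x :: A4) = A0 ++ A1 ++ A2 ++ (A3 ++ [x]) ++ A4 by simp]
      rw [ih A0 A1 A2 (A3 ++ [x]) A4 h0 h1 h2
        (by intro r hrm; rcases List.mem_append.mp hrm with h | h
            · exact h3 r h
            · simp at h; rw [h]; exact hr) h4]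
      simp [pvF_cons, hr]
    · rw [PySem.List.insertBy_of_forall_not_before _ x _ (by
        intro a ha; simp only [List.mem_append] at ha
        rcases ha with (((h | h) | h) | h) | h
        · simp [hr, h0 a h]
        · simp [hr, h1 a h]
        · simp [hr, h2 a h]
        · simp [hr, h3 a h]
        · simp [hr, h4 a h])]
      rw [show (A0 ++ A1 ++ A2 ++ A3 ++ A4) ++ [x] = A0 ++ A1 ++ A2 ++ A3 ++ (A4 ++ [x]) by simp]
      rw [ih A0 A1 A2 A3 (A4 ++ [x]) h0 h1 h2 h3
        (by intro r hrm; rcases List.mem_append.mp hrm with h | h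
            · exact h4 r h
            · simp at h; rw [h]; exact hr)]
      simp [pvF_cons, hr]

theorem sorted_eq_buckets (xs : List (List (String × String))) :
    PySem.List.sorted xs pvRank false
      = pvF 0 xs ++ pvF 1 xs ++ pvF 2 xs ++ pvF 3 xs ++ pvF 4 xs := by
  have h := foldl_ins xs [] [] [] [] [] (by simp) (by simp) (by simp) (by simp) (by simp)
  simpa [PySem.List.sorted] using h

-- A's grouping loop produces exactly the five rank buckets
theorem pvGroup_aux (xs : List (List (String × String))) :
    ∀ a0 a1 a2 a3 a4 : List (List (String × String)),
      xs.foldl (fun g req =>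
          let t := PySem.Dict.getD (PySem.Dict.mk req) "type" "other"
          if t = "functional" then (g.1 ++ [req], g.2.1, g.2.2.1, g.2.2.2.1, g.2.2.2.2)
          else if t = "non-functional" then (g.1, g.2.1 ++ [req], g.2.2.1, g.2.2.2.1, g.2.2.2.2)
          else if t = "technical" then (g.1, g.2.1, g.2.2.1 ++ [req], g.2.2.2.1, g.2.2.2.2)
          else if t = "business" then (g.1, g.2.1, g.2.2.1, g.2.2.2.1 ++ [req], g.2.2.2.2)
          else (g.1, g.2.1, g.2.2.1, g.2.2.2.1, g.2.2.2.2 ++ [req]))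
        (a0, a1, a2, a3, a4)
      = (a0 ++ pvF 0 xs, a1 ++ pvF 1 xs, a2 ++ pvF 2 xs, a3 ++ pvF 3 xs, a4 ++ pvF 4 xs) := by
  induction xs with
  | nil => intro a0 a1 a2 a3 a4; simp [pvF]
  | cons x xs ih =>
    intro a0 a1 a2 a3 a4
    rw [List.foldl_cons]
    have hrk := pvRank_cases x
    by_cases c0 : PySem.Dict.getD (PySem.Dict.mk x) "type" "other" = "functional"
    · have hr : pvRank x = 0 := by rw [hrk]; simp [c0]
      simp only [c0, if_true]
      rw [ih]
      simp [pvF_cons, hr]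
    by_cases c1 : PySem.Dict.getD (PySem.Dict.mk x) "type" "other" = "non-functional"
    · have hr : pvRank x = 1 := by rw [hrk]; simp [c1]
      simp only [c0, c1, if_false, if_true]
      rw [ih]
      simp [pvF_cons, hr]
    by_cases c2 : PySem.Dict.getD (PySem.Dict.mk x) "type" "other" = "technical"
    · have hr : pvRank x = 2 := by rw [hrk]; simp [c0, c1, c2]
      simp only [c0, c1, c2, if_false, if_true]
      rw [ih]
      simp [pvF_cons, hr]
    by_cases c3 : PySem.Dict.getD (PySem.Dict.mk x) "type" "other" = "business"
    · have hr : pvRank x = 3 := by rw [hrk]; simp [c0, c1, c2, c3]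
      simp only [c0, c1, c2, c3, if_false, if_true]
      rw [ih]
      simp [pvF_cons, hr]
    · have hr : pvRank x = 4 := by rw [hrk]; simp [c0, c1, c2, c3]
      simp only [c0, c1, c2, c3, if_false]
      rw [ih]
      simp [pvF_cons, hr]

theorem pvGroup_eq (xs : List (List (String × String))) :
    pvGroup xs = (pvF 0 xs, pvF 1 xs, pvF 2 xs, pvF 3 xs, pvF 4 xs) := by
  unfold pvGroup
  simpa using pvGroup_aux xs [] [] [] [] []

-- B's step inside a bucket: prev already equals the rank, no header, same body as A's inner loop
theorem pvStep_no_hdr (x : List (String × String)) (doc : List String) (seen : List String)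
    (i : Int) (hx : pvRank x = i) :
    pvStep (doc, seen, some i) x
      = ((pvItem (doc, seen) x).1, (pvItem (doc, seen) x).2, some i) := by
  simp only [pvStep, pvItem, hx, PySem.Set.contains, PySem.Set.add]
  simp only [List.contains_eq_mem]
  split_ifs <;> simp_all

theorem scan_same (i : Int) (xs : List (List (String × String)))
    (h : ∀ r ∈ xs, pvRank r = i) :
    ∀ doc seen : List String,
      xs.foldl pvStep (doc, seen, some i)
        = ((xs.foldl pvItem (doc, seen)).1, (xs.foldl pvItem (doc, seen)).2, some i) := by
  induction xs with
  | nil => intro doc seen; simp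
  | cons x xs ih =>
    intro doc seen
    rw [List.foldl_cons, pvStep_no_hdr x doc seen i (h x (by simp)), List.foldl_cons]
    exact ih (fun r hr => h r (by simp [hr])) _ _

-- B's pass over one bucket followed by the rest = A's per-bucket emission
theorem scan_bucket (i : Int) (L rest : List (List (String × String)))
    (hL : ∀ r ∈ L, pvRank r = i) :
    ∀ (doc seen : List String) (prev : Option Int), prev ≠ some i →
      (L ++ rest).foldl pvStep (doc, seen, prev)
        = rest.foldl pvStep ((pvEmitBucket (pvHeaderOf i) L (doc, seen)).1,
            (pvEmitBucket (pvHeaderOf i) L (doc, seen)).2,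
            if L.isEmpty then prev else some i) := by
  cases L with
  | nil => intro doc seen prev _; simp [pvEmitBucket]
  | cons x xs =>
    intro doc seen prev hprev
    have hx : pvRank x = i := hL x (by simp)
    have hne : some i ≠ prev := fun hh => hprev hh.symm
    have first : pvStep (doc, seen, prev) x
        = ((pvItem (doc ++ [pvHeaderOf i, ""], seen) x).1,
           (pvItem (doc ++ [pvHeaderOf i, ""], seen) x).2, some i) := by
      simp only [pvStep, pvItem, hx, PySem.Set.contains, PySem.Set.add]
      simp only [List.contains_eq_mem, hne, ne_eq, not_false_eq_true, if_true]
      split_ifs <;> simp_all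
    rw [List.cons_append, List.foldl_cons, first, List.foldl_append,
        scan_same i xs (fun r hr => hL r (by simp [hr])) _ _]
    simp [pvEmitBucket_eq]

-- first-bucket prev values can never equal a later bucket index
theorem pvPrev_ne (p : Option Int) (j i : Int) (L : List (List (String × String)))
    (hj : j < i) (hp : p ≠ some i) : (if L.isEmpty then p else some j) ≠ some i := by
  split_ifs
  · exact hp
  · simp; omega

-- ===== VERDICT (by name: the statement is the Claim_ definition above) =====
theorem generate_requirements_document_spec : Claim_equal_generate_requirements_document := by
  unfold Claim_equal_generate_requirements_document
  intro requirements document_structure output_format _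
  unfold Spec_generate_requirements_document
  simp only [generate_requirements_document, generate_requirements_document_alt]
  rw [pvGroup_eq, sorted_eq_buckets]
  have hF : ∀ (i : Int) (r : List (String × String)), r ∈ pvF i requirements → pvRank r = i := by
    intro i r hr
    simp only [pvF, List.mem_filter, decide_eq_true_eq] at hr
    exact hr.2
  rw [show pvF 0 requirements ++ pvF 1 requirements ++ pvF 2 requirements ++ pvF 3 requirements
        ++ pvF 4 requirements
      = pvF 0 requirements ++ (pvF 1 requirements ++ (pvF 2 requirements ++ (pvF 3 requirements
        ++ (pvF 4 requirements ++ ([] : List (List (String × String))))))) from by simp]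
  rw [show (PySem.Set.empty : PySem.Set String) = ([] : List String) from rfl]
  rw [scan_bucket 0 _ _ (hF 0) _ _ none (by simp)]
  rw [scan_bucket 1 _ _ (hF 1) _ _ _ (pvPrev_ne _ 0 1 _ (by omega) (by simp))]
  rw [scan_bucket 2 _ _ (hF 2) _ _ _
    (pvPrev_ne _ 1 2 _ (by omega) (pvPrev_ne _ 0 2 _ (by omega) (by simp)))]
  rw [scan_bucket 3 _ _ (hF 3) _ _ _
    (pvPrev_ne _ 2 3 _ (by omega)
      (pvPrev_ne _ 1 3 _ (by omega) (pvPrev_ne _ 0 3 _ (by omega) (by simp))))]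
  rw [scan_bucket 4 _ _ (hF 4) _ _ _
    (pvPrev_ne _ 3 4 _ (by omega)
      (pvPrev_ne _ 2 4 _ (by omega)
        (pvPrev_ne _ 1 4 _ (by omega) (pvPrev_ne _ 0 4 _ (by omega) (by simp)))))]
  rw [show pvHeaderOf 0 = "## Functional Requirements" from rfl,
      show pvHeaderOf 1 = "## Non-Functional Requirements" by norm_num [pvHeaderOf],
      show pvHeaderOf 2 = "## Technical Requirements" by norm_num [pvHeaderOf],
      show pvHeaderOf 3 = "## Business Requirements" by norm_num [pvHeaderOf],
      show pvHeaderOf 4 = "## Other Requirements" by norm_num [pvHeaderOf]]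
  simp
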